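-- pv_equiv track=rewrite | github.com/orenvlad-ai/wb-core | packages/application/registry_upload_http_entrypoint.py | _status_note_is_latest_confirmed
-- ===== SOURCE A (Python) =====
-- def _status_note_is_latest_confirmed(note: str) -> bool:
--     normalized = str(note or "").strip().lower()
--     if not normalized:
--         return False
--     latest_confirmed_tokens = (
--         "latest_confirmed",
--         "fallback",
--         "runtime_cache",
--         "accepted_closed_runtime_snapshot",
--         "accepted_current_runtime_snapshot",
--         "accepted_closed_from_prior_current_snapshot",
--         "accepted_closed_from_prior_current_cache",
--         "accepted_prior_current_runtime_cache",
--         "exact_date_provisional_runtime_cache",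
--         "accepted_closed_from_interval_replay",
--         "accepted_current_from_prior",
--         "accepted_closed_preserved_after_invalid_attempt",
--         "accepted_current_preserved_after_invalid_attempt",
--         "exact_date_stocks_history_runtime_cache",
--         "exact_date_promo_current_runtime_cache",
--         "exact_date_runtime_cache",
--     )
--     return any(token in normalized for token in latest_confirmed_tokens)
-- ===== SOURCE B (Python) =====
-- _TOKENS = (
--     "latest_confirmed",
--     "fallback",
--     "runtime_cache",
--     "accepted_closed_runtime_snapshot",
--     "accepted_current_runtime_snapshot",
--     "accepted_closed_from_prior_current_snapshot",
--     "accepted_closed_from_prior_current_cache",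
--     "accepted_prior_current_runtime_cache",
--     "exact_date_provisional_runtime_cache",
--     "accepted_closed_from_interval_replay",
--     "accepted_current_from_prior",
--     "accepted_closed_preserved_after_invalid_attempt",
--     "accepted_current_preserved_after_invalid_attempt",
--     "exact_date_stocks_history_runtime_cache",
--     "exact_date_promo_current_runtime_cache",
--     "exact_date_runtime_cache",
-- )
--
-- # tokens grouped by their first character, built once at import time
-- _BY_FIRST = {}
-- for _t in _TOKENS:
--     _BY_FIRST.setdefault(_t[0], []).append(_t)
--
--
-- def _status_note_is_latest_confirmed(note: str) -> bool:
--     normalized = str(note or "").strip().lower()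
--     for i, ch in enumerate(normalized):
--         for t in _BY_FIRST.get(ch, ()):
--             if normalized.startswith(t, i):
--                 return True
--     return False
-- ===== Notes on version B (the rewrite author's own statement) =====
-- stated objective: alternative
-- what changed: Replaces A's 16 independent whole-string substring searches ('token in normalized' per token) by a single left-to-right scan over the string that at each position looks up a precomputed first-character bucket dict and tests only the few tokens starting with that character as prefixes.
import Mathlib
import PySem

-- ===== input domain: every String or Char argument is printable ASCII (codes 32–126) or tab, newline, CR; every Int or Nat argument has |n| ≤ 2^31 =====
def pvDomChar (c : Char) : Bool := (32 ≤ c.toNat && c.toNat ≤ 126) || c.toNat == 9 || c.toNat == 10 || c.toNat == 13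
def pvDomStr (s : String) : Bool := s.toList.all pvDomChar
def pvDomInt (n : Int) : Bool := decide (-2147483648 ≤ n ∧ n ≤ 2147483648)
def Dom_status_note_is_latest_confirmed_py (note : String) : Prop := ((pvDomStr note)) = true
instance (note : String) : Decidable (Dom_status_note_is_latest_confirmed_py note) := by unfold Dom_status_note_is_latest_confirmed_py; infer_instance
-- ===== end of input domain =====

-- B replaces A's 16 independent substring searches by one left-to-right scan that, at each
-- position, consults a first-character bucket table and tests only the matching tokens as
-- prefixes (objective: alternative single-pass dispatch algorithm, same exact results).


-- ===== PORT A =====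
def aTokens : List String :=
  [ "latest_confirmed"
  , "fallback"
  , "runtime_cache"
  , "accepted_closed_runtime_snapshot"
  , "accepted_current_runtime_snapshot"
  , "accepted_closed_from_prior_current_snapshot"
  , "accepted_closed_from_prior_current_cache"
  , "accepted_prior_current_runtime_cache"
  , "exact_date_provisional_runtime_cache"
  , "accepted_closed_from_interval_replay"
  , "accepted_current_from_prior"
  , "accepted_closed_preserved_after_invalid_attempt"
  , "accepted_current_preserved_after_invalid_attempt"
  , "exact_date_stocks_history_runtime_cache"
  , "exact_date_promo_current_runtime_cache"
  , "exact_date_runtime_cache" ]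

-- `str(note or "")` is the identity on a str argument ('' stays ''), so it is ported as `note`.
def status_note_is_latest_confirmed_py (note : String) : Bool :=
  let normalized := PySem.Str.lower (PySem.Str.strip note)
  if normalized = "" then false
  else aTokens.any (fun token => PySem.Str.isIn token normalized)

-- ===== PORT B =====
def altTokens : List String :=
  [ "latest_confirmed"
  , "fallback"
  , "runtime_cache"
  , "accepted_closed_runtime_snapshot"
  , "accepted_current_runtime_snapshot"
  , "accepted_closed_from_prior_current_snapshot"
  , "accepted_closed_from_prior_current_cache"
  , "accepted_prior_current_runtime_cache"
  , "exact_date_provisional_runtime_cache"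
  , "accepted_closed_from_interval_replay"
  , "accepted_current_from_prior"
  , "accepted_closed_preserved_after_invalid_attempt"
  , "accepted_current_preserved_after_invalid_attempt"
  , "exact_date_stocks_history_runtime_cache"
  , "exact_date_promo_current_runtime_cache"
  , "exact_date_runtime_cache" ]

-- `_BY_FIRST`: dict built once by `setdefault(t[0], []).append(t)`; every token is a
-- nonempty literal, so the `match` arm for [] (t[0] would raise) is never taken.
def altByFirst : PySem.Dict Char (List String) :=
  altTokens.foldl (fun d t =>
    match t.toList with
    | [] => d
    | c :: _ => d.insert c (d.getD c [] ++ [t])) PySem.Dict.empty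

-- the `for i, ch in enumerate(normalized)` loop; `normalized.startswith(t, i)` is
-- `startswith` on the current suffix (c :: rest), which is exactly normalized[i:].
def altScan : List Char → Bool
  | [] => false
  | c :: rest =>
      (altByFirst.getD c []).any (fun t => PySem.Chars.startswith (c :: rest) t.toList)
      || altScan rest

def status_note_is_latest_confirmed_py_alt (note : String) : Bool :=
  altScan (PySem.Str.lower (PySem.Str.strip note)).toList

-- ===== PRECONDITION & SPEC =====
def Spec_status_note_is_latest_confirmed_py (note : String) (out : Bool) : Prop := out = status_note_is_latest_confirmed_py_alt note
instance (note : String) (out : Bool) : Decidable (Spec_status_note_is_latest_confirmed_py note out) := by unfold Spec_status_note_is_latest_confirmed_py; infer_instance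

-- ===== CLAIM (what is proved, stated in full; the proofs are below) =====
def Claim_equal_status_note_is_latest_confirmed_py : Prop := ∀ (note : String), Dom_status_note_is_latest_confirmed_py note → Spec_status_note_is_latest_confirmed_py note (status_note_is_latest_confirmed_py note)

-- ===== LEMMAS AND PROOFS =====

theorem startswith_eq_decide (s p : List Char) :
    PySem.Chars.startswith s p = decide (p <+: s) := by
  cases hb : PySem.Chars.startswith s p
  · have : ¬ p <+: s := fun h => by
      rw [(PySem.Chars.startswith_iff s p).2 h] at hb; exact Bool.true_eq_false.mp hb
    simp [this]
  · simp [(PySem.Chars.startswith_iff s p).1 hb]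

theorem isIn_eq_decide (sub s : List Char) :
    PySem.Chars.isIn sub s = decide (sub <:+: s) := by
  cases hb : PySem.Chars.isIn sub s
  · have : ¬ sub <:+: s := fun h => by
      rw [(PySem.Chars.isIn_iff_infix sub s).2 h] at hb; exact Bool.true_eq_false.mp hb
    simp [this]
  · simp [(PySem.Chars.isIn_iff_infix sub s).1 hb]

theorem any_or {α : Type} (l : List α) (p q : α → Bool) :
    l.any (fun x => p x || q x) = (l.any p || l.any q) := by
  induction l with
  | nil => rfl
  | cons a l ih =>
      cases hp : p a <;> cases hq : q a <;>
        simp [List.any_cons, hp, hq, ih, Bool.or_comm]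

-- the bucket table, evaluated
theorem byFirst_eval : altByFirst = PySem.Dict.mk
    [ ('l', ["latest_confirmed"])
    , ('f', ["fallback"])
    , ('r', ["runtime_cache"])
    , ('a', [ "accepted_closed_runtime_snapshot"
            , "accepted_current_runtime_snapshot"
            , "accepted_closed_from_prior_current_snapshot"
            , "accepted_closed_from_prior_current_cache"
            , "accepted_prior_current_runtime_cache"
            , "accepted_closed_from_interval_replay"
            , "accepted_current_from_prior"
            , "accepted_closed_preserved_after_invalid_attempt"
            , "accepted_current_preserved_after_invalid_attempt" ])
    , ('e', [ "exact_date_provisional_runtime_cache"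
            , "exact_date_stocks_history_runtime_cache"
            , "exact_date_promo_current_runtime_cache"
            , "exact_date_runtime_cache" ]) ] := by
  decide

-- at any position, scanning only the first-character bucket tests the same prefixes
-- as scanning the whole token list
theorem bucket_any (c : Char) (cs : List Char) :
    (altByFirst.getD c []).any (fun t => PySem.Chars.startswith (c :: cs) t.toList)
      = altTokens.any (fun t => decide (t.toList <+: c :: cs)) := by
  simp only [startswith_eq_decide, byFirst_eval, PySem.Dict.getD, PySem.Dict.get?_mk_cons]
  by_cases h1 : c = 'l'
  · subst h1; simp [altTokens, List.cons_prefix_cons]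
  by_cases h2 : c = 'f'
  · subst h2; simp [altTokens, List.cons_prefix_cons]
  by_cases h3 : c = 'r'
  · subst h3; simp [altTokens, List.cons_prefix_cons]
  by_cases h4 : c = 'a'
  · subst h4; simp [altTokens, List.cons_prefix_cons]
  by_cases h5 : c = 'e'
  · subst h5; simp [altTokens, List.cons_prefix_cons]
  · simp [altTokens, List.cons_prefix_cons, PySem.Dict.get?, List.find?,
      Ne.symm h1, Ne.symm h2, Ne.symm h3, Ne.symm h4, Ne.symm h5]

theorem altScan_eq_any_infix (cs : List Char) :
    altScan cs = altTokens.any (fun t => decide (t.toList <:+: cs)) := by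
  induction cs with
  | nil => simp [altScan]; decide
  | cons c rest ih =>
      have hfun : (fun t : String => decide (t.toList <:+: c :: rest))
          = fun t : String => decide (t.toList <+: c :: rest) || decide (t.toList <:+: rest) := by
        funext t; simp [List.infix_cons_iff]
      rw [altScan, hfun, any_or, bucket_any, ih]

-- ===== VERDICT (by name: the statement is the Claim_ definition above) =====
theorem status_note_is_latest_confirmed_py_spec : Claim_equal_status_note_is_latest_confirmed_py := by
  intro note _
  unfold Spec_status_note_is_latest_confirmed_py
  unfold status_note_is_latest_confirmed_py status_note_is_latest_confirmed_py_alt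
  set normalized := PySem.Str.lower (PySem.Str.strip note) with hn
  by_cases h : normalized = ""
  · simp [h, altScan]
  · simp only [h, altScan_eq_any_infix, altTokens]
    have hfun : (fun token : String => PySem.Str.isIn token normalized)
        = fun t : String => decide (t.toList <:+: normalized.toList) := by
      funext t; rw [PySem.Str.isIn_eq, isIn_eq_decide]
    rw [hfun]
    simp [aTokens]
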